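-- pv_equiv track=rewrite | github.com/tusaunyapat/CompProg | 0934.py | pattern4
-- ===== SOURCE A (Python) =====
-- def pattern4(N):
--     ans = []
--     start = 1
--     for i in range(N):
--         run = []
--         for k in range(i):
--             run.append(0)
--         n = start -1
--         for j in range(N-i):
--             n += + j + 1 + i
--             run.append(n)
--         ans.append(run)
--         start += i
--     return ans
-- ===== SOURCE B (Python) =====
-- def pattern4(N):
--     # Each cell computed by closed form instead of a running cumulative sum.
--     return [[0] * i + [i * (i - 1) // 2 + (j + 1) * (i + 1) + j * (j + 1) // 2
--                        for j in range(N - i)]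
--             for i in range(N)]
-- ===== Notes on version B (the rewrite author's own statement) =====
-- stated objective: simpler
-- what changed: Replaced the running start/n accumulators and the explicit zero-appending loop by a direct closed-form triangular-number formula per cell, with a replicated-zeros prefix, built as one comprehension.
import Mathlib
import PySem

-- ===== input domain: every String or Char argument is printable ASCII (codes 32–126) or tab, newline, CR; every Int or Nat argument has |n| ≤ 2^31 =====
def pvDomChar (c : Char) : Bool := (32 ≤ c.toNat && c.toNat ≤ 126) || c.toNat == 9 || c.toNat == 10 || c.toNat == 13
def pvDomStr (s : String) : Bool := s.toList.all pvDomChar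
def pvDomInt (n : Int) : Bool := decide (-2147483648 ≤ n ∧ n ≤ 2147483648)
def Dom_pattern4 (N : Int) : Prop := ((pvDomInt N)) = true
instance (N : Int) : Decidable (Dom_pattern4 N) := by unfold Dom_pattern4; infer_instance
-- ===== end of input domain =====

-- B replaces A's running cumulative-sum accumulators by a closed-form formula per cell (simpler).

-- ===== PORT A =====
def pattern4 (N : Int) : List (List Int) :=
  ((PySem.List.pyRange 0 N 1).foldl
    (fun (st : List (List Int) × Int) i =>
      -- run = []; for k in range(i): run.append(0)
      let run : List Int := (PySem.List.pyRange 0 i 1).foldl (fun r _ => r ++ [(0 : Int)]) []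
      -- n = start - 1; for j in range(N-i): n += j+1+i; run.append(n)
      let inner := (PySem.List.pyRange 0 (N - i) 1).foldl
        (fun (p : List Int × Int) j => (p.1 ++ [p.2 + j + 1 + i], p.2 + j + 1 + i))
        (run, st.2 - 1)
      (st.1 ++ [inner.1], st.2 + i))
    ([], 1)).1

-- ===== PORT B =====
def pattern4_alt (N : Int) : List (List Int) :=
  (PySem.List.pyRange 0 N 1).map (fun i =>
    -- [0]*i  (i ≥ 0 here since i comes from range(N))
    List.replicate i.toNat (0 : Int) ++
    (PySem.List.pyRange 0 (N - i) 1).map (fun j =>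
      PySem.Int.floordiv (i * (i - 1)) 2 + (j + 1) * (i + 1) + PySem.Int.floordiv (j * (j + 1)) 2))

-- ===== PRECONDITION & SPEC =====
def Spec_pattern4 (N : Int) (out : List (List Int)) : Prop := out = pattern4_alt N
instance (N : Int) (out : List (List Int)) : Decidable (Spec_pattern4 N out) := by unfold Spec_pattern4; infer_instance

-- ===== CLAIM (what is proved, stated in full; the proofs are below) =====
def Claim_equal_pattern4 : Prop := ∀ (N : Int), Dom_pattern4 N → Spec_pattern4 N (pattern4 N)

-- ===== LEMMAS AND PROOFS =====

-- triangular number i*(i-1)/2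
def pvT (n : Nat) : Nat := n * (n - 1) / 2

lemma pvT_succ (n : Nat) : pvT (n + 1) = pvT n + n := by
  unfold pvT
  cases n with
  | zero => rfl
  | succ m =>
    have h : (m + 2) * (m + 1) = (m + 1) * m + (m + 1) * 2 := by ring
    simp only [Nat.add_sub_cancel, h, Nat.add_mul_div_right _ _ (by omega : 0 < 2)]

lemma pvRange_toNat (x : Int) :
    PySem.List.pyRange 0 x 1 = PySem.List.pyRange 0 (x.toNat : Int) 1 := by
  by_cases h : 0 ≤ x
  · rw [Int.toNat_of_nonneg h]
  · rw [PySem.List.pyRange_one_eq_nil (by omega), PySem.List.pyRange_one_eq_nil (by omega)]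

lemma pvRange_cast (m : Nat) :
    PySem.List.pyRange 0 (m : Int) 1 = (List.range m).map (fun k : Nat => (k : Int)) := by
  induction m with
  | zero =>
    rw [show ((0 : Nat) : Int) = 0 from rfl, PySem.List.pyRange_one_eq_nil le_rfl]
    simp
  | succ m ih =>
    have hc : ((m + 1 : Nat) : Int) = (m : Int) + 1 := by push_cast; ring
    rw [hc, PySem.List.pyRange_one_succ_right (by positivity), ih, List.range_succ,
      List.map_append]
    simp

lemma zeros_fold (x : Int) : ∀ (r0 : List Int),
    (PySem.List.pyRange 0 x 1).foldl (fun r _ => r ++ [(0 : Int)]) r0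
      = r0 ++ List.replicate x.toNat (0 : Int) := by
  rw [pvRange_toNat, pvRange_cast]
  induction x.toNat with
  | zero => simp
  | succ m ih =>
    intro r0
    rw [List.range_succ]
    rw [List.map_append, List.foldl_append, ih r0]
    simp [List.replicate_succ']

lemma inner_fold (i n0 : Int) : ∀ (m : Nat) (r0 : List Int),
    (PySem.List.pyRange 0 (m : Int) 1).foldl
      (fun (p : List Int × Int) j => (p.1 ++ [p.2 + j + 1 + i], p.2 + j + 1 + i)) (r0, n0)
    = (r0 ++ (List.range m).map (fun k => n0 + (pvT (k + 2) : Int) + i * (k + 1)),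
       n0 + (pvT (m + 1) : Int) + i * m) := by
  intro m
  induction m with
  | zero => intro r0; simp [pvT]
  | succ m ih =>
    intro r0
    have hc : ((m + 1 : Nat) : Int) = (m : Int) + 1 := by push_cast; ring
    rw [hc, PySem.List.pyRange_one_succ_right (by positivity)]
    rw [List.foldl_append, ih r0]
    simp only [List.foldl_cons, List.foldl_nil, List.range_succ, List.map_append, List.map_cons,
      List.map_nil, List.append_assoc]
    have ht : (pvT (m + 2) : Int) = (pvT (m + 1) : Int) + (m + 1) := by
      have := pvT_succ (m + 1); push_cast [this]; ring
    have hv : n0 + (pvT (m + 1) : Int) + i * (m : Int) + (m : Int) + 1 + i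
        = n0 + (pvT (m + 2) : Int) + i * ((m : Int) + 1) := by rw [ht]; ring
    rw [hv]

-- B's cell value in closed Nat-triangular form
lemma bval_eq (M k : Nat) :
    PySem.Int.floordiv ((M : Int) * ((M : Int) - 1)) 2 + ((k : Int) + 1) * ((M : Int) + 1)
      + PySem.Int.floordiv ((k : Int) * ((k : Int) + 1)) 2
    = (pvT M : Int) + (pvT (k + 2) : Int) + (M : Int) * ((k : Int) + 1) := by
  have h1 : PySem.Int.floordiv ((M : Int) * ((M : Int) - 1)) 2 = (pvT M : Int) := by
    cases M with
    | zero => simp [PySem.Int.floordiv, pvT]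
    | succ m =>
      have h : ((m + 1 : Nat) : Int) * (((m + 1 : Nat) : Int) - 1) = (((m + 1) * m : Nat) : Int) := by
        push_cast; ring
      rw [h]
      simp [pvT]
  have h2 : PySem.Int.floordiv ((k : Int) * ((k : Int) + 1)) 2 = (pvT (k + 1) : Int) := by
    have h : ((k : Int)) * ((k : Int) + 1) = ((k * (k + 1) : Nat) : Int) := by push_cast; ring
    rw [h]
    simp [pvT, Nat.mul_comm]
  have ht : (pvT (k + 2) : Int) = (pvT (k + 1) : Int) + (k + 1) := by
    have := pvT_succ (k + 1); push_cast [this]; ring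
  rw [h1, h2, ht]; ring

-- the row A builds for outer index M (as B writes it)
def pvRow (N : Int) (M : Nat) : List Int :=
  List.replicate M (0 : Int) ++
    (List.range (N - M).toNat).map (fun k => (pvT M : Int) + (pvT (k + 2) : Int) + (M : Int) * (k + 1))

lemma outer_fold (N : Int) : ∀ (M : Nat) (acc : List (List Int)),
    (PySem.List.pyRange 0 (M : Int) 1).foldl
      (fun (st : List (List Int) × Int) i =>
        let run : List Int := (PySem.List.pyRange 0 i 1).foldl (fun r _ => r ++ [(0 : Int)]) []
        let inner := (PySem.List.pyRange 0 (N - i) 1).foldl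
          (fun (p : List Int × Int) j => (p.1 ++ [p.2 + j + 1 + i], p.2 + j + 1 + i))
          (run, st.2 - 1)
        (st.1 ++ [inner.1], st.2 + i))
      (acc, 1)
    = (acc ++ (List.range M).map (pvRow N), 1 + (pvT M : Int)) := by
  intro M
  induction M with
  | zero => intro acc; simp [pvT]
  | succ M ih =>
    intro acc
    have hc : ((M + 1 : Nat) : Int) = (M : Int) + 1 := by push_cast; ring
    rw [hc, PySem.List.pyRange_one_succ_right (by positivity)]
    rw [List.foldl_append, ih acc]
    simp only [List.foldl_cons, List.foldl_nil]
    have hz : (PySem.List.pyRange 0 (M : Int) 1).foldl (fun r _ => r ++ [(0 : Int)]) ([] : List Int)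
        = List.replicate M (0 : Int) := by
      rw [zeros_fold]; simp
    have hi := inner_fold (M : Int) ((pvT M : Int)) (N - M).toNat (List.replicate M (0 : Int))
    rw [hz]
    have hn0 : (1 : Int) + (pvT M : Int) - 1 = (pvT M : Int) := by ring
    rw [hn0, pvRange_toNat (N - M), hi]
    have ht : (pvT (M + 1) : Int) = (pvT M : Int) + M := by
      have := pvT_succ M; push_cast [this]; ring
    rw [List.range_succ, List.map_append, ht]
    simp only [Prod.mk.injEq]
    refine ⟨?_, by ring⟩
    simp [pvRow, List.append_assoc]

-- ===== VERDICT (by name: the statement is the Claim_ definition above) =====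
theorem pattern4_spec : Claim_equal_pattern4 := by
  intro N _
  unfold Spec_pattern4 pattern4 pattern4_alt
  rw [pvRange_toNat N, outer_fold N N.toNat [], pvRange_cast, List.map_map]
  simp only [List.nil_append]
  apply List.map_congr_left
  intro k _
  simp only [Function.comp_apply, Int.toNat_natCast]
  unfold pvRow
  congr 1
  rw [pvRange_toNat (N - (k : Int)), pvRange_cast, List.map_map]
  apply List.map_congr_left
  intro j _
  simp only [Function.comp_apply]
  exact (bval_eq k j).symm
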